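-- pv_equiv track=rewrite | github.com/opencomputeproject/SAI | ptf/saihash.py | verify_no_lb
-- ===== SOURCE A (Python) =====
-- MAX_ITRS = 50
--
-- def verify_no_lb(lb_counts, max_iters=MAX_ITRS):
--     """
--     Verifies if LB has no effect and all traffic
--     is directed to single port only
--
--     Args:
--         lb_counts (list): load balancing counts list
--         max_iters (int): maximum number of iterations
--
--     Returns:
--         boolean: True if load balancing has no effect,
--                  False otherwise
--     """
--     cnt = 0
--     for port_cnt in lb_counts:
--         if port_cnt != 0:
--             if port_cnt != max_iters:
--                 # should be 0 or max_iters only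
--                 return False
--             cnt += 1
--         if cnt > 1:
--             return False
--     return True
-- ===== SOURCE B (Python) =====
-- MAX_ITRS = 50
--
-- def verify_no_lb(lb_counts, max_iters=MAX_ITRS):
--     # Phase 1: skip the leading run of zeros.
--     i = 0
--     n = len(lb_counts)
--     while i < n and lb_counts[i] == 0:
--         i += 1
--     if i == n:
--         return True
--     # Phase 2: the first nonzero must be max_iters and everything after it zero.
--     return lb_counts[i] == max_iters and all(c == 0 for c in lb_counts[i + 1:])
-- ===== Notes on version B (the rewrite author's own statement) =====
-- stated objective: simpler
-- what changed: Replaces A's single stateful loop with a nonzero counter and two early returns by a two-phase decomposition: skip the leading run of zeros, then decide everything with one expression on the suffix (its first element equals max_iters and the rest are all zero) - no counter is maintained.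
import Mathlib
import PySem

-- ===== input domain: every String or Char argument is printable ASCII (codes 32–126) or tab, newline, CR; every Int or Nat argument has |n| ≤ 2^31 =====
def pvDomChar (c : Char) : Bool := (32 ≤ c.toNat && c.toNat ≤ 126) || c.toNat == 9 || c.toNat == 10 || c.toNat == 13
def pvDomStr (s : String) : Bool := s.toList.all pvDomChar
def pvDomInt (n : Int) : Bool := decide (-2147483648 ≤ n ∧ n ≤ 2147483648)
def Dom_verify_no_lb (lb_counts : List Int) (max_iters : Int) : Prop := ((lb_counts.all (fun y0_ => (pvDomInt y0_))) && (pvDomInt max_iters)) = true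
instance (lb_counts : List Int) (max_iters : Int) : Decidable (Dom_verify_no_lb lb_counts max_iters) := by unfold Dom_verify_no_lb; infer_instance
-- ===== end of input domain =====

-- B replaces A's counting loop by a two-phase decomposition: drop the leading
-- zeros, then one check on the suffix (objective: simpler).
-- ===== PORT A =====
-- the for-loop of A, carrying the running count cnt; early `return False`s become `false`
def verify_no_lb.loop (max_iters : Int) : List Int → Int → Bool
  | [], _ => true
  | port_cnt :: rest, cnt =>
    if port_cnt ≠ 0 then
      if port_cnt ≠ max_iters then false
      else if cnt + 1 > 1 then false
      else verify_no_lb.loop max_iters rest (cnt + 1)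
    else if cnt > 1 then false
    else verify_no_lb.loop max_iters rest cnt

def verify_no_lb (lb_counts : List Int) (max_iters : Int) : Bool :=
  verify_no_lb.loop max_iters lb_counts 0

-- ===== PORT B =====
-- phase 1 of B: the while-loop advancing the index past the leading zeros,
-- rendered as structural recursion returning the remaining suffix lb_counts[i:]
def verify_no_lb_alt.skipZeros : List Int → List Int
  | [] => []
  | h :: t => if h == 0 then verify_no_lb_alt.skipZeros t else h :: t

def verify_no_lb_alt (lb_counts : List Int) (max_iters : Int) : Bool :=
  match verify_no_lb_alt.skipZeros lb_counts with
  | [] => true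
  | h :: t => (h == max_iters) && t.all (fun c => c == 0)

-- ===== PRECONDITION & SPEC =====
def Spec_verify_no_lb (lb_counts : List Int) (max_iters : Int) (out : Bool) : Prop := out = verify_no_lb_alt lb_counts max_iters
instance (lb_counts : List Int) (max_iters : Int) (out : Bool) : Decidable (Spec_verify_no_lb lb_counts max_iters out) := by unfold Spec_verify_no_lb; infer_instance

-- ===== CLAIM (what is proved, stated in full; the proofs are below) =====
def Claim_equal_verify_no_lb : Prop := ∀ (lb_counts : List Int) (max_iters : Int), Dom_verify_no_lb lb_counts max_iters → Spec_verify_no_lb lb_counts max_iters (verify_no_lb lb_counts max_iters)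

-- ===== LEMMAS AND PROOFS =====
-- after one nonzero has been counted (cnt = 1), A's loop accepts iff the rest is all zeros
theorem verify_no_lb_loop_one (m : Int) (l : List Int) :
    verify_no_lb.loop m l 1 = l.all (fun c => c == 0) := by
  induction l with
  | nil => simp [verify_no_lb.loop]
  | cons p rest ih =>
    by_cases hp : p = 0
    · simp [verify_no_lb.loop, hp, ih]
    · by_cases hm : p = m
      · have hm0 : m ≠ 0 := hm ▸ hp
        simp [verify_no_lb.loop, hp, hm, hm0, ih]
      · simp [verify_no_lb.loop, hp, hm]

-- from cnt = 0, A's loop computes exactly B's two-phase answer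
theorem verify_no_lb_loop_zero (m : Int) (l : List Int) :
    verify_no_lb.loop m l 0 = verify_no_lb_alt l m := by
  induction l with
  | nil => simp [verify_no_lb.loop, verify_no_lb_alt, verify_no_lb_alt.skipZeros]
  | cons p rest ih =>
    by_cases hp : p = 0
    · simpa [verify_no_lb.loop, verify_no_lb_alt, verify_no_lb_alt.skipZeros, hp] using ih
    · by_cases hm : p = m
      · have hm0 : m ≠ 0 := hm ▸ hp
        simp [verify_no_lb.loop, verify_no_lb_alt, verify_no_lb_alt.skipZeros, hm, hm0,
          verify_no_lb_loop_one]
      · simp [verify_no_lb.loop, verify_no_lb_alt, verify_no_lb_alt.skipZeros, hp, hm]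

-- ===== VERDICT (by name: the statement is the Claim_ definition above) =====
theorem verify_no_lb_spec : Claim_equal_verify_no_lb := by
  intro l m _
  unfold Spec_verify_no_lb verify_no_lb
  exact verify_no_lb_loop_zero m l
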